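-- pv_equiv track=rewrite | github.com/rrwt/daily-coding-challenge | daily_problems/problem_201_to_300/221.py | seven_ish_number
-- ===== SOURCE A (Python) =====
-- def seven_ish_number(n: int) -> int:
--     if n == 1:
--         return 1
--
--     nums = [0] * (n + 1)
--     nums[1] = 1
--     next_power = 1
--     last_filled_index = 1
--
--     while last_filled_index < n:
--         cur_index = last_filled_index + 1
--         power_val = pow(7, next_power)
--
--         for k in range(last_filled_index + 1):
--             nums[cur_index] = power_val + nums[k]
--             cur_index += 1
--
--             if cur_index > n:
--                 break
--
--         last_filled_index = cur_index - 1
--         next_power += 1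
--
--     return nums[n]
-- ===== SOURCE B (Python) =====
-- def seven_ish_number(n: int) -> int:
--     # nth "seven-ish" number: map the binary digits of n onto powers of 7
--     result = 0
--     power = 1
--     while n > 0:
--         if n & 1:
--             result += power
--         power *= 7
--         n >>= 1
--     return result
-- ===== Notes on version B (the rewrite author's own statement) =====
-- stated objective: faster
-- what changed: Instead of tabulating all n seven-ish numbers block by block in an O(n)-size array, B reads off the answer directly from the binary digits of n (bit i of n contributes 7^i), a closed-form O(log n) loop with O(1) space.
-- outside the precondition, e.g. on seven_ish_number(0): A raises IndexError, B returns 0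
import Mathlib
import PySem

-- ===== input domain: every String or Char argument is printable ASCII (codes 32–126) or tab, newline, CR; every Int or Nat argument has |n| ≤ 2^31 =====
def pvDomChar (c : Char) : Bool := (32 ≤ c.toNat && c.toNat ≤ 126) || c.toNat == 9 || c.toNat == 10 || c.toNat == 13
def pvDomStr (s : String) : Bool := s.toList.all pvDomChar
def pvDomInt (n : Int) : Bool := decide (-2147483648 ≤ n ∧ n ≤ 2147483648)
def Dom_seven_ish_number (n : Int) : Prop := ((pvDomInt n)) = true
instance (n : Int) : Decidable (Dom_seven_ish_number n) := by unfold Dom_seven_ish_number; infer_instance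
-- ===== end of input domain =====

-- B changes the algorithm: instead of tabulating all n seven-ish numbers in an array (A),
-- it maps the binary digits of n onto powers of 7 (measured asymptotically faster).

-- ===== PORT A =====
-- inner `for k in range(last_filled_index + 1)` loop: sets nums[cur] = power_val + nums[k],
-- increments cur, breaks when cur > n.  Under Pre_ (n ≥ 1) every index touched is in range,
-- so List.set / List.getD are exact for Python's nums[cur] = … / nums[k].
def sevenInner (n pv : Int) : List Int → Array Int → Int → Array Int × Int
  | [], nums, cur => (nums, cur)
  | k :: rest, nums, cur =>
    let v := pv + nums.getD k.toNat 0
    let nums' := nums.set! cur.toNat v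
    let cur' := cur + 1
    if n < cur' then (nums', cur') else sevenInner n pv rest nums' cur'

-- outer `while last_filled_index < n` loop; fuel = n.toNat only bounds the iteration count
-- (last_filled_index strictly increases every pass, so it always suffices).
def sevenLoop (n : Int) : Nat → Array Int → Int → Nat → Array Int
  | 0, nums, _, _ => nums
  | fuel + 1, nums, last, np =>
    if last < n then
      let pv : Int := 7 ^ np                                   -- pow(7, next_power)
      let r := sevenInner n pv (PySem.List.pyRange 0 (last + 1) 1) nums (last + 1)
      sevenLoop n fuel r.1 (r.2 - 1) (np + 1)
    else nums

def seven_ish_number (n : Int) : Int :=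
  if n = 1 then 1
  else
    let nums : Array Int := (Array.replicate (n + 1).toNat 0).set! 1 1   -- nums = [0]*(n+1); nums[1] = 1
    (sevenLoop n n.toNat nums 1 1).getD n.toNat 0                     -- return nums[n]

-- ===== PORT B =====
-- `while n > 0` loop carrying result/power; the loop body only runs for n > 0, where Python's
-- n & 1 / n >>= 1 are exactly m % 2 / m / 2 on m = n.toNat (and for n ≤ 0 both return result = 0).
def sevenAltLoop (m : Nat) (power result : Int) : Int :=
  if m = 0 then result
  else sevenAltLoop (m / 2) (power * 7) (result + if m % 2 = 1 then power else 0)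
decreasing_by exact Nat.div_lt_self (Nat.pos_of_ne_zero (by assumption)) (by norm_num)

def seven_ish_number_alt (n : Int) : Int := sevenAltLoop n.toNat 1 0

-- ===== PRECONDITION & SPEC =====
-- Pre_ excludes exactly n ≤ 0, where Python A raises IndexError (nums[1] = 1 on a list of length ≤ 1).
def Pre_seven_ish_number (n : Int) : Prop := 1 ≤ n
instance (n : Int) : Decidable (Pre_seven_ish_number n) := by unfold Pre_seven_ish_number; infer_instance
def pvWitness_seven_ish_number : Int := 5

def Spec_seven_ish_number (n : Int) (out : Int) : Prop := out = seven_ish_number_alt n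
instance (n : Int) (out : Int) : Decidable (Spec_seven_ish_number n out) := by unfold Spec_seven_ish_number; infer_instance

-- ===== CLAIM (what is proved, stated in full; the proofs are below) =====
def Claim_equal_seven_ish_number : Prop := ∀ (n : Int), Dom_seven_ish_number n → Pre_seven_ish_number n → Spec_seven_ish_number n (seven_ish_number n)

-- ===== LEMMAS AND PROOFS =====

-- the specification value: bit i of m contributes 7^i
def bits7 (m : Nat) : Int :=
  if m = 0 then 0
  else (if m % 2 = 1 then 1 else 0) + 7 * bits7 (m / 2)
decreasing_by exact Nat.div_lt_self (Nat.pos_of_ne_zero (by assumption)) (by norm_num)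

lemma bits7_zero : bits7 0 = 0 := by rw [bits7]; simp
lemma bits7_one : bits7 1 = 1 := by rw [bits7]; norm_num [bits7_zero]

lemma sevenAltLoop_eq (m : Nat) : ∀ power result : Int,
    sevenAltLoop m power result = result + power * bits7 m := by
  induction m using Nat.strong_induction_on with
  | _ m ih =>
    intro power result
    rw [sevenAltLoop, bits7]
    by_cases h : m = 0
    · simp [h]
    · rw [if_neg h, if_neg h, ih (m / 2) (Nat.div_lt_self (Nat.pos_of_ne_zero h) (by norm_num))]
      by_cases h2 : m % 2 = 1 <;> simp [h2] <;> ring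

lemma alt_eq_bits7 (n : Int) : seven_ish_number_alt n = bits7 n.toNat := by
  rw [seven_ish_number_alt, sevenAltLoop_eq]; ring

-- key block identity: the (2^p + k)-th seven-ish number is 7^p more than the k-th
lemma bits7_pow_add (p k : Nat) (hk : k < 2 ^ p) : bits7 (2 ^ p + k) = 7 ^ p + bits7 k := by
  induction p generalizing k with
  | zero =>
    interval_cases k
    norm_num [bits7_one, bits7_zero]
  | succ p ih =>
    have h2 : (2 ^ (p + 1) + k) % 2 = k % 2 := by
      have : 2 ^ (p + 1) = 2 * 2 ^ p := by ring
      omega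
    have h3 : (2 ^ (p + 1) + k) / 2 = 2 ^ p + k / 2 := by
      have : 2 ^ (p + 1) = 2 * 2 ^ p := by ring
      omega
    have hk2 : k / 2 < 2 ^ p := by
      have : 2 ^ (p + 1) = 2 * 2 ^ p := by ring
      omega
    rw [bits7, if_neg (by positivity), h2, h3, ih (k / 2) hk2]
    conv_rhs => rw [bits7]
    by_cases hk0 : k = 0
    · simp [hk0, bits7_zero, pow_succ]; ring
    · rw [if_neg hk0]
      by_cases h2' : k % 2 = 1 <;> simp [h2', pow_succ] <;> ring

-- getD/set! helpers on in-range indices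
lemma getD_set_eq (a : Array Int) (i : Nat) (v : Int) (h : i < a.size) :
    (a.set! i v).getD i 0 = v := by
  rw [Array.set!, Array.getD_eq_getD_getElem?, Array.getElem?_setIfInBounds]
  simp [h]

lemma getD_set_ne (a : Array Int) (i j : Nat) (v : Int) (h : i ≠ j) :
    (a.set! i v).getD j 0 = a.getD j 0 := by
  rw [Array.set!, Array.getD_eq_getD_getElem?, Array.getElem?_setIfInBounds, if_neg h,
    ← Array.getD_eq_getD_getElem?]

lemma sevenInner_spec (n : Int) (p : Nat) :
    ∀ d j : Nat, ∀ nums : Array Int,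
      j ≤ 2 ^ p → 2 ^ p - j = d →
      nums.size = n.toNat + 1 →
      ((2 ^ p + j : Nat) : Int) ≤ n →
      (∀ i : Nat, i < 2 ^ p + j → nums.getD i 0 = bits7 i) →
      (sevenInner n (7 ^ p) (PySem.List.pyRange (j : Int) ((2 ^ p : Nat) : Int) 1) nums ((2 ^ p + j : Nat) : Int)).1.size = nums.size ∧
      (sevenInner n (7 ^ p) (PySem.List.pyRange (j : Int) ((2 ^ p : Nat) : Int) 1) nums ((2 ^ p + j : Nat) : Int)).2 - 1 = min n (2 * 2 ^ p - 1) ∧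
      (∀ i : Nat, (i : Int) ≤ (sevenInner n (7 ^ p) (PySem.List.pyRange (j : Int) ((2 ^ p : Nat) : Int) 1) nums ((2 ^ p + j : Nat) : Int)).2 - 1 →
        (sevenInner n (7 ^ p) (PySem.List.pyRange (j : Int) ((2 ^ p : Nat) : Int) 1) nums ((2 ^ p + j : Nat) : Int)).1.getD i 0 = bits7 i) := by
  intro d
  induction d with
  | zero =>
    intro j nums hj hd hlen hcur hvals
    have hj2 : j = 2 ^ p := by omega
    subst hj2
    rw [PySem.List.pyRange_one_eq_nil (by omega)]
    rw [sevenInner]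
    have hpc : ((2 ^ p : Nat) : Int) = 2 ^ p := by push_cast; ring
    have h1p : (1:Nat) ≤ 2 ^ p := Nat.one_le_two_pow
    refine ⟨rfl, by push_cast at hcur ⊢; omega, ?_⟩
    intro i hi
    apply hvals
    push_cast at hi
    omega
  | succ d ih =>
    intro j nums hj hd hlen hcur hvals
    have hpc : ((2 ^ p : Nat) : Int) = 2 ^ p := by push_cast; ring
    have h1p : (1:Nat) ≤ 2 ^ p := Nat.one_le_two_pow
    have hjlt : j < 2 ^ p := by omega
    rw [PySem.List.pyRange_one_cons (by exact_mod_cast hjlt)]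
    rw [sevenInner]
    have hjn : ((j : Int)).toNat = j := by omega
    have hcn : (((2 ^ p + j : Nat) : Int)).toNat = 2 ^ p + j := by omega
    have hidx : 2 ^ p + j < nums.size := by
      push_cast at hcur; omega
    have hval : nums.getD ((j : Int)).toNat 0 = bits7 j := by
      rw [hjn]; exact hvals j (by omega)
    set nums' := nums.set! (((2 ^ p + j : Nat) : Int)).toNat (7 ^ p + nums.getD ((j : Int)).toNat 0) with hnums'
    have hlen' : nums'.size = nums.size := Array.size_set! _ _ _
    have hvals' : ∀ i : Nat, i < 2 ^ p + (j + 1) → nums'.getD i 0 = bits7 i := by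
      intro i hi
      by_cases hij : i = 2 ^ p + j
      · subst hij
        rw [hnums', hcn, hval, getD_set_eq _ _ _ hidx]
        exact (bits7_pow_add p j hjlt).symm
      · rw [hnums', hcn, getD_set_ne _ _ _ _ (by omega)]
        exact hvals i (by omega)
    by_cases hbr : n < ((2 ^ p + j : Nat) : Int) + 1
    · rw [if_pos hbr]
      have hne : n = ((2 ^ p + j : Nat) : Int) := by omega
      refine ⟨hlen', ?_, ?_⟩
      · push_cast at hne ⊢; omega
      · intro i hi
        apply hvals'
        push_cast at hi
        omega
    · rw [if_neg hbr]
      have hcast1 : ((j : Int)) + 1 = ((j + 1 : Nat) : Int) := by push_cast; ring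
      have hcast2 : ((2 ^ p + j : Nat) : Int) + 1 = ((2 ^ p + (j + 1) : Nat) : Int) := by push_cast; ring
      rw [hcast1, hcast2]
      have := ih (j + 1) nums' (by omega) (by omega) (by omega)
        (by push_cast at hbr ⊢; omega) hvals'
      exact ⟨by omega, this.2.1, this.2.2⟩

lemma sevenLoop_spec (n : Int) (hn : 2 ≤ n) :
    ∀ fuel : Nat, ∀ nums : Array Int, ∀ last : Int, ∀ p : Nat,
      (n - last).toNat ≤ fuel →
      nums.size = n.toNat + 1 →
      last = min n (2 ^ p - 1) →
      (∀ i : Nat, (i : Int) ≤ last → nums.getD i 0 = bits7 i) →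
      (sevenLoop n fuel nums last p).getD n.toNat 0 = bits7 n.toNat := by
  intro fuel
  induction fuel with
  | zero =>
    intro nums last p hfuel hlen hmin hvals
    have hp : (0:Int) < 2 ^ p := by positivity
    have hlast : last = n := by omega
    rw [sevenLoop]
    exact hvals n.toNat (by omega)
  | succ fuel ih =>
    intro nums last p hfuel hlen hmin hvals
    have hp : (0:Int) < 2 ^ p := by positivity
    rw [sevenLoop]
    by_cases hlt : last < n
    · rw [if_pos hlt]
      have hpc : ((2 ^ p : Nat) : Int) = 2 ^ p := by push_cast; ring
      have h1p : (1:Nat) ≤ 2 ^ p := Nat.one_le_two_pow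
      have hlast : last = 2 ^ p - 1 := by omega
      have hcast : last + 1 = ((2 ^ p : Nat) : Int) := by omega
      have h := sevenInner_spec n p (2 ^ p) 0 nums (by omega) (by omega) hlen
        (by push_cast; omega)
        (by intro i hi; apply hvals; omega)
      simp only [Nat.add_zero, Nat.cast_zero] at h
      rw [hcast]
      obtain ⟨h1, h2, h3⟩ := h
      apply ih
      · -- fuel bound: new last ≥ last + 1
        have hge : min n (2 * 2 ^ p - 1) ≥ last + 1 := by
          by_cases hc : n ≤ 2 * 2 ^ p - 1
          · rw [min_eq_left hc]; omega
          · rw [min_eq_right (by omega)]; omega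
        omega
      · omega
      · -- new last = min n (2^(p+1) - 1)
        rw [h2]
        have h21 : (2:Int) ^ (p + 1) = 2 * 2 ^ p := by ring
        rw [h21]
      · exact h3
    · rw [if_neg hlt]
      have hlast : last = n := by omega
      exact hvals n.toNat (by omega)

-- ===== VERDICT (by name: the statement is the Claim_ definition above) =====
theorem seven_ish_number_spec : Claim_equal_seven_ish_number := by
  intro n _ hpre
  unfold Spec_seven_ish_number
  rw [alt_eq_bits7]
  by_cases h1 : n = 1
  · subst h1
    rw [seven_ish_number, if_pos rfl]
    rw [show ((1:Int)).toNat = 1 from rfl, bits7_one]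
  · have hn : 2 ≤ n := by unfold Pre_seven_ish_number at hpre; omega
    rw [seven_ish_number, if_neg h1]
    apply sevenLoop_spec n hn
    · omega
    · rw [Array.size_set!, Array.size_replicate]; omega
    · omega
    · intro i hi
      have hi2 : i ≤ 1 := by exact_mod_cast hi
      interval_cases i
      · rw [bits7_zero, getD_set_ne _ _ _ _ (by omega)]
        rw [Array.getD_eq_getD_getElem?, Array.getElem?_replicate, if_pos (by omega)]
        rfl
      · rw [bits7_one, getD_set_eq]
        rw [Array.size_replicate]; omega
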